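-- pv_equiv track=rewrite | github.com/mbuhidar/thrift_assist | ocr_annotate_phrases_better.py | is_meaningful_phrase
-- ===== SOURCE A (Python) =====
-- COMMON_WORDS = {
--     'the', 'and', 'or', 'but', 'in', 'on', 'at', 'to', 'for', 'of', 'with',
--     'by', 'from', 'up', 'about', 'into', 'through', 'during', 'before',
--     'after', 'above', 'below', 'between', 'among', 'a', 'an', 'is', 'are',
--     'was', 'were', 'be', 'been', 'being', 'have', 'has', 'had', 'do', 'does',
--     'did', 'will', 'would', 'could', 'should', 'may', 'might', 'must', 'can',
--     'this', 'that', 'these', 'those', 'i', 'you', 'he', 'she', 'it', 'we',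
--     'they', 'me', 'him', 'her', 'us', 'them', 'my', 'your', 'his', 'her',
--     'its', 'our', 'their'
-- }
--
-- def is_meaningful_phrase(phrase):
--     """
--     Check if a phrase is meaningful (not just common words).
--     Returns True if the phrase should be searched for.
--     """
--     words = phrase.lower().strip().split()
--
--     # Always allow single words that aren't common
--     if len(words) == 1:
--         return words[0] not in COMMON_WORDS
--
--     # For multi-word phrases, require at least one non-common word
--     # OR allow phrases where common words appear multiple times (like "The The")
--     non_common_words = [w for w in words if w not in COMMON_WORDS]
--
--     # Allow if there are non-common words
--     if non_common_words:
--         return True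
--
--     # Allow if common words are repeated (like "The The", "All All")
--     if len(set(words)) < len(words):
--         return True
--
--     # Filter out phrases that are only common words
--     return False
-- ===== SOURCE B (Python) =====
-- COMMON_WORDS = set(
--     "the and or but in on at to for of with by from up about into through "
--     "during before after above below between among a an is are was were be "
--     "been being have has had do does did will would could should may might "
--     "must can this that these those i you he she it we they me him her us "
--     "them my your his its our their".split()
-- )
--
--
-- def is_meaningful_phrase(phrase):
--     """Single pass with early exit: meaningful iff some word is non-common
--     or some word repeats."""
--     seen = set()
--     for w in phrase.lower().strip().split():
--         if w not in COMMON_WORDS or w in seen: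
--             return True
--         seen.add(w)
--     return False
-- ===== Notes on version B (the rewrite author's own statement) =====
-- stated objective: simpler
-- what changed: Replaces A's early-return chain (single-word special case, filter of non-common words, set-length comparison) by a single pass over the words with a seen-set that exits early on the first non-common or repeated word; the common-word set is built from one split string instead of a braced literal.
import Mathlib
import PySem

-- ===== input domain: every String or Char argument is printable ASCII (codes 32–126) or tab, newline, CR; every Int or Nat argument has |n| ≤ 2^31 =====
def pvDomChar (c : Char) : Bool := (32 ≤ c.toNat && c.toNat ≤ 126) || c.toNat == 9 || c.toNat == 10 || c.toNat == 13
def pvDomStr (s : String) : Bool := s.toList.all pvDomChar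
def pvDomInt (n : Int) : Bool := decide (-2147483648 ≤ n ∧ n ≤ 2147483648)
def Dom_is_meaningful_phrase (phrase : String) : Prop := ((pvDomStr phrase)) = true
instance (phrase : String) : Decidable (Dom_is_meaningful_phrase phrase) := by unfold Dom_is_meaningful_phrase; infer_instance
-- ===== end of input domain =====

-- B replaces A's early-return chain and set-length comparison by one pass with a seen-set
-- and early exit, and builds the common-word set from one split string (objective: simpler);
-- same return value on every input.

-- ===== PORT A =====
-- module constant COMMON_WORDS as A's module writes it: a braced set literal
def commonWords : PySem.Set String := PySem.Set.ofList
  ["the", "and", "or", "but", "in", "on", "at", "to", "for", "of", "with",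
   "by", "from", "up", "about", "into", "through", "during", "before",
   "after", "above", "below", "between", "among", "a", "an", "is", "are",
   "was", "were", "be", "been", "being", "have", "has", "had", "do", "does",
   "did", "will", "would", "could", "should", "may", "might", "must", "can",
   "this", "that", "these", "those", "i", "you", "he", "she", "it", "we",
   "they", "me", "him", "her", "us", "them", "my", "your", "his", "her",
   "its", "our", "their"]

def is_meaningful_phrase (phrase : String) : Bool :=
  let words := PySem.Str.split₀ (PySem.Str.strip (PySem.Str.lower phrase))
  if words.length == 1 then
    !(PySem.Set.contains commonWords (words.headD ""))   -- words[0], safe: length = 1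
  else
    let non_common_words := words.filter (fun w => !(PySem.Set.contains commonWords w))
    if !non_common_words.isEmpty then
      true
    else if (PySem.Set.ofList words).length < words.length then
      true
    else
      false

-- ===== PORT B =====
-- B's COMMON_WORDS: one space-separated string, split then made a set
def bCommon : PySem.Set String := PySem.Set.ofList (PySem.Str.split₀
  ("the and or but in on at to for of with by from up about into through " ++
   "during before after above below between among a an is are was were be " ++
   "been being have has had do does did will would could should may might " ++
   "must can this that these those i you he she it we they me him her us " ++
   "them my your his its our their"))

def altLoop : List String → PySem.Set String → Bool
  | [], _ => false
  | w :: ws, seen =>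
    if !(PySem.Set.contains bCommon w) || PySem.Set.contains seen w then true
    else altLoop ws (PySem.Set.add seen w)

def is_meaningful_phrase_alt (phrase : String) : Bool :=
  altLoop (PySem.Str.split₀ (PySem.Str.strip (PySem.Str.lower phrase))) PySem.Set.empty

-- ===== PRECONDITION & SPEC =====
def Spec_is_meaningful_phrase (phrase : String) (out : Bool) : Prop := out = is_meaningful_phrase_alt phrase
instance (phrase : String) (out : Bool) : Decidable (Spec_is_meaningful_phrase phrase out) := by unfold Spec_is_meaningful_phrase; infer_instance

-- ===== CLAIM (what is proved, stated in full; the proofs are below) =====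
def Claim_equal_is_meaningful_phrase : Prop := ∀ (phrase : String), Dom_is_meaningful_phrase phrase → Spec_is_meaningful_phrase phrase (is_meaningful_phrase phrase)

-- ===== LEMMAS AND PROOFS =====

-- the two spellings of COMMON_WORDS denote the same set
set_option maxRecDepth 16384 in
lemma bCommon_eq : bCommon = commonWords := by decide

lemma contains_eq (w : String) :
    PySem.Set.contains bCommon w = PySem.Set.contains commonWords w := by
  rw [bCommon_eq]

lemma altLoop_step (w : String) (t : List String) (seen : PySem.Set String) :
    altLoop (w :: t) seen =
      ((!(PySem.Set.contains commonWords w) || PySem.Set.contains seen w) ||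
        altLoop t (PySem.Set.add seen w)) := by
  show (if _ then _ else _) = _
  rw [contains_eq]
  by_cases h : (!(PySem.Set.contains commonWords w) || PySem.Set.contains seen w) = true
  · simp
  · simp

-- B's loop returns true iff some word is non-common, some word is already in seen,
-- or the word list has an internal repeat.
set_option maxRecDepth 8192 in
lemma altLoop_char (ws : List String) (seen : PySem.Set String) :
    altLoop ws seen =
      (ws.any (fun w => !(PySem.Set.contains commonWords w)) ||
       ws.any (fun w => PySem.Set.contains seen w) ||
       !(decide ws.Nodup)) := by
  induction ws generalizing seen with
  | nil => simp [altLoop]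
  | cons w t ih =>
    rw [altLoop_step]
    by_cases hw : w ∈ seen
    · rw [PySem.Set.add_of_mem hw, ih, Bool.eq_iff_iff]
      simp only [List.any_cons, Bool.or_eq_true, List.any_eq_true]
      simp [List.nodup_cons, hw]
      try tauto
    · rw [PySem.Set.add_of_not_mem hw, ih, Bool.eq_iff_iff]
      simp [List.nodup_cons, List.mem_append]
      constructor
      · rintro ((h | h) | (h | ⟨x, hx, (h | rfl)⟩) | h)
        · exact Or.inl (Or.inl (Or.inl h))
        · exact Or.inl (Or.inr (Or.inl h))
        · exact Or.inl (Or.inl (Or.inr h))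
        · exact Or.inl (Or.inr (Or.inr ⟨x, hx, h⟩))
        · exact Or.inr (Or.inl hx)
        · exact Or.inr (Or.inr h)
      · rintro (((h | h) | (h | ⟨x, hx, h⟩)) | h | h)
        · exact Or.inl (Or.inl h)
        · exact Or.inr (Or.inl (Or.inl h))
        · exact Or.inl (Or.inr h)
        · exact Or.inr (Or.inl (Or.inr ⟨x, hx, Or.inl h⟩))
        · exact Or.inr (Or.inl (Or.inr ⟨w, h, Or.inr rfl⟩))
        · exact Or.inr (Or.inr h)

-- |set(ws)| = |ws| exactly when ws has no repeats
lemma length_ofList_eq_iff_nodup (ws : List String) :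
    (PySem.Set.ofList ws).length = ws.length ↔ ws.Nodup := by
  induction ws with
  | nil => simp [PySem.Set.ofList_nil]
  | cons w t ih =>
    rw [PySem.Set.ofList_cons]
    have hle := PySem.Set.length_ofList_le (α := String) (xs := t)
    by_cases hw : w ∈ t
    · have hmem : w ∈ PySem.Set.ofList t := by simpa using hw
      have hlt : (PySem.Set.discard (PySem.Set.ofList t) w).length < (PySem.Set.ofList t).length := by
        simp only [PySem.Set.discard]
        apply List.length_filter_lt_length_iff_exists.mpr
        exact ⟨w, hmem, by simp⟩
      constructor
      · intro h; simp only [List.length_cons] at h; omega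
      · intro h; exact absurd hw ((List.nodup_cons.mp h).1)
    · have hd : PySem.Set.discard (PySem.Set.ofList t) w = PySem.Set.ofList t := by
        simp only [PySem.Set.discard]
        apply List.filter_eq_self.mpr
        intro y hy
        have hyt : y ∈ t := by simpa using hy
        by_cases h : y = w
        · exact absurd (h ▸ hyt) hw
        · simp [h]
      rw [hd]
      simp [List.nodup_cons, hw, ih]

lemma setlen_iff (ws : List String) :
    (PySem.Set.ofList ws).length < ws.length ↔ ¬ ws.Nodup := by
  have hle := PySem.Set.length_ofList_le (α := String) (xs := ws)
  rw [← length_ofList_eq_iff_nodup ws]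
  omega

lemma core_eq (ws : List String) :
    (if ws.length == 1 then
      !(PySem.Set.contains commonWords (ws.headD ""))
    else
      let non_common_words := ws.filter (fun w => !(PySem.Set.contains commonWords w))
      if !non_common_words.isEmpty then true
      else if (PySem.Set.ofList ws).length < ws.length then true
      else false) = altLoop ws PySem.Set.empty := by
  rw [altLoop_char]
  have hempty : (List.any ws fun w => PySem.Set.contains PySem.Set.empty w) = false := by
    simp [PySem.Set.empty]
  rw [hempty]
  match ws with
  | [] => simp
  | [w] => simp
  | w :: v :: t =>
    rw [if_neg (by simp)]
    simp only []
    by_cases hf : ((w :: v :: t).filter (fun w => !(PySem.Set.contains commonWords w))).isEmpty = true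
    · have hall : (List.any (w :: v :: t) fun w => !(PySem.Set.contains commonWords w)) = false := by
        rw [List.isEmpty_iff] at hf
        have := List.filter_eq_nil_iff.mp hf
        simp only [List.any_eq_false]
        intro x hx
        simpa using this x hx
      rw [show (!((w :: v :: t).filter (fun w => !(PySem.Set.contains commonWords w))).isEmpty) = false by rw [hf]; rfl]
      rw [if_neg (by simp)]
      rw [hall]
      by_cases hnd : (w :: v :: t).Nodup
      · rw [if_neg (by rw [setlen_iff]; exact not_not_intro hnd)]
        simp [hnd]
      · rw [if_pos ((setlen_iff _).mpr hnd)]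
        simp [hnd]
    · have hsome : (List.any (w :: v :: t) fun w => !(PySem.Set.contains commonWords w)) = true := by
        rw [List.isEmpty_iff] at hf
        rcases List.exists_mem_of_ne_nil _ hf with ⟨x, hx⟩
        have hx1 := List.mem_filter.mp hx
        exact List.any_eq_true.mpr ⟨x, hx1.1, hx1.2⟩
      rw [show (!((w :: v :: t).filter (fun w => !(PySem.Set.contains commonWords w))).isEmpty) = true by simp at hf ⊢; exact hf]
      rw [if_pos rfl, hsome]
      simp

-- ===== VERDICT (by name: the statement is the Claim_ definition above) =====
theorem is_meaningful_phrase_spec : Claim_equal_is_meaningful_phrase := by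
  intro phrase _
  unfold Spec_is_meaningful_phrase is_meaningful_phrase is_meaningful_phrase_alt
  exact core_eq (PySem.Str.split₀ (PySem.Str.strip (PySem.Str.lower phrase)))
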